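-- pv_equiv track=rewrite | github.com/xdass/35_diff_service | diff.py | html2list
-- ===== SOURCE A (Python) =====
-- import difflib, string
--
-- def html2list(x, b=0):
--     mode = 'char'
--     cur = ''
--     out = []
--     for c in x:
--         if mode == 'tag':
--             if c == '>':
--                 if b:
--                     cur += ']'
--                 else:
--                     cur += c
--                 out.append(cur)
--                 cur = ''
--                 mode = 'char'
--             else:
--                 cur += c
--         elif mode == 'char':
--             if c == '<':
--                 out.append(cur)
--                 if b:
--                     cur = '['
--                 else:
--                     cur = c
--                 mode = 'tag'
--             elif c in string.whitespace:
--                 out.append(cur+c)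
--                 cur = ''
--             else:
--                 cur += c
--     out.append(cur)
--     return list(filter(lambda x: x.strip() is not '', out))
-- ===== SOURCE B (Python) =====
-- import string
--
-- _WS = set(string.whitespace)
--
-- def html2list(x, b=0):
--     # chunk-scanner: jumps over tags and words by index instead of a
--     # per-character mode/cur state machine, and never emits a token that
--     # the final whitespace filter would drop (so there is no filter pass)
--     out = []
--     i, n = 0, len(x)
--     while i < n:
--         c = x[i]
--         if c == '<':
--             j = x.find('>', i + 1)
--             if j < 0:
--                 out.append(('[' if b else '<') + x[i + 1:])
--                 break
--             inner = x[i + 1:j]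
--             out.append('[' + inner + ']' if b else '<' + inner + '>')
--             i = j + 1
--         elif c in _WS:
--             i += 1
--         else:
--             j = i + 1
--             while j < n and x[j] != '<' and x[j] not in _WS:
--                 j += 1
--             if j < n and x[j] in _WS:
--                 out.append(x[i:j + 1])
--                 i = j + 1
--             else:
--                 out.append(x[i:j])
--                 i = j
--     return out
-- ===== Notes on version B (the rewrite author's own statement) =====
-- stated objective: alternative
-- what changed: Replaces A's per-character mode/cur state machine plus a final whitespace filter pass with an index-jumping chunk scanner that locates each tag with str.find and each word by a bounded scan, emitting only the kept tokens directly.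
import Mathlib
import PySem

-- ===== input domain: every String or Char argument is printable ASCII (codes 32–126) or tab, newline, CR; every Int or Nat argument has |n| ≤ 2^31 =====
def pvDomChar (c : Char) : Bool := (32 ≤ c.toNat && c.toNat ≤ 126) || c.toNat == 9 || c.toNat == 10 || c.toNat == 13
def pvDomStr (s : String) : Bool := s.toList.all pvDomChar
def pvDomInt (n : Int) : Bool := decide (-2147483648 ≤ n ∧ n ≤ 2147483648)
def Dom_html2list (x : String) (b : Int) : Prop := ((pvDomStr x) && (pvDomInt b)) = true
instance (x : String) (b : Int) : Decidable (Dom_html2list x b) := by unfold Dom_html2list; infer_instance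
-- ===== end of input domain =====

-- B replaces A's per-character mode/cur state machine + final whitespace filter by an
-- index-jumping chunk scanner that emits each tag/word token directly (objective: alternative).

-- string.whitespace
def pvWS : List Char := [' ', '\t', '\n', '\r', '\x0b', '\x0c']

-- ===== PORT A =====
-- one iteration of A's for-loop: state = (mode is 'tag', cur, out)
def pvStepA (b : Int) (st : Bool × List Char × List (List Char)) (c : Char) :
    Bool × List Char × List (List Char) :=
  match st with
  | (mode, cur, out) =>
    if mode then
      if c = '>' then (false, [], out ++ [cur ++ [if b ≠ 0 then ']' else c]])
      else (true, cur ++ [c], out)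
    else
      if c = '<' then (true, [if b ≠ 0 then '[' else c], out ++ [cur])
      else if pvWS.contains c then (false, [], out ++ [cur ++ [c]])
      else (false, cur ++ [c], out)

def html2list (x : String) (b : Int) : List String :=
  let st := x.toList.foldl (pvStepA b) (false, [], [])
  (((st.2.2 ++ [st.2.1]).filter (fun t => decide (PySem.Chars.strip t ≠ []))).map String.ofList)

-- ===== PORT B =====
-- Source B's while loop over an advancing index, as recursion on the remaining suffix;
-- x.find('>', i+1) and the inner word scan become dropWhile/takeWhile on the suffix
def pvGoB (b : Int) : List Char → List (List Char)
  | [] => []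
  | c :: rest =>
    if c = '<' then
      let t := rest.takeWhile (fun d => d != '>')
      let r := rest.dropWhile (fun d => d != '>')
      if r = [] then [(if b ≠ 0 then '[' else '<') :: t]
      else ((if b ≠ 0 then '[' else '<') :: t ++ [if b ≠ 0 then ']' else '>']) :: pvGoB b r.tail
    else if pvWS.contains c then pvGoB b rest
    else
      let t := rest.takeWhile (fun d => !(pvWS.contains d) && d != '<')
      let r := rest.dropWhile (fun d => !(pvWS.contains d) && d != '<')
      if hr : r = [] then [c :: t]
      else if pvWS.contains (r.head hr) then (c :: t ++ [r.head hr]) :: pvGoB b r.tail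
      else (c :: t) :: pvGoB b r
termination_by l => l.length
decreasing_by
  all_goals
    first
    | (have hl := List.length_dropWhile_le (p := fun d => d != '>') (l := rest)
       simp only [List.length_cons, List.length_tail] at *
       omega)
    | (have hl := List.length_dropWhile_le (p := fun d => !(pvWS.contains d) && d != '<') (l := rest)
       simp only [List.length_cons, List.length_tail] at *
       omega)

def html2list_alt (x : String) (b : Int) : List String :=
  (pvGoB b x.toList).map String.ofList

-- ===== PRECONDITION & SPEC =====
def Spec_html2list (x : String) (b : Int) (out : List String) : Prop := out = html2list_alt x b
instance (x : String) (b : Int) (out : List String) : Decidable (Spec_html2list x b out) := by unfold Spec_html2list; infer_instance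

-- ===== CLAIM (what is proved, stated in full; the proofs are below) =====
def Claim_equal_html2list : Prop := ∀ (x : String) (b : Int), Dom_html2list x b → Spec_html2list x b (html2list x b)

-- ===== LEMMAS AND PROOFS =====

def pvFilt (l : List (List Char)) : List (List Char) :=
  l.filter (fun t => decide (PySem.Chars.strip t ≠ []))

-- B's tag chunk, generalized to a partial tag `cur` already read
def pvTagFin (b : Int) (cur rest : List Char) : List (List Char) :=
  let t := rest.takeWhile (fun d => d != '>')
  let r := rest.dropWhile (fun d => d != '>')
  if r = [] then [cur ++ t]
  else (cur ++ t ++ [if b ≠ 0 then ']' else '>']) :: pvGoB b r.tail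

-- B's word chunk, generalized to a partial word `cur` already read
def pvWordFin (b : Int) (cur rest : List Char) : List (List Char) :=
  let t := rest.takeWhile (fun d => !(pvWS.contains d) && d != '<')
  let r := rest.dropWhile (fun d => !(pvWS.contains d) && d != '<')
  if hr : r = [] then [cur ++ t]
  else if pvWS.contains (r.head hr) then (cur ++ t ++ [r.head hr]) :: pvGoB b r.tail
  else (cur ++ t) :: pvGoB b r

lemma pvGoB_nil (b : Int) : pvGoB b [] = [] := by simp [pvGoB]

lemma pvGoB_tag (b : Int) (rest : List Char) :
    pvGoB b ('<' :: rest) = pvTagFin b [if b ≠ 0 then '[' else '<'] rest := by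
  rw [pvGoB, pvTagFin]
  simp

lemma pvGoB_ws (b : Int) (c : Char) (rest : List Char) (hne : c ≠ '<')
    (hws : pvWS.contains c = true) : pvGoB b (c :: rest) = pvGoB b rest := by
  rw [pvGoB]
  simp [hne, show c ∈ pvWS from by simpa using hws]

lemma pvGoB_word (b : Int) (c : Char) (rest : List Char) (hne : c ≠ '<')
    (hws : pvWS.contains c = false) : pvGoB b (c :: rest) = pvWordFin b [c] rest := by
  rw [pvGoB, pvWordFin]
  simp [hne, show c ∉ pvWS from by simpa using hws]

lemma pvFilt_append (l : List (List Char)) (t : List Char) :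
    pvFilt (l ++ [t]) = pvFilt l ++ pvFilt [t] := by
  simp [pvFilt]

lemma pvStrip_ne_nil (l : List Char) (h : ∃ c ∈ l, PySem.Chars.isspace c = false) :
    PySem.Chars.strip l ≠ [] := by
  intro hs
  obtain ⟨c, hc, hf⟩ := h
  have hall : ∀ d ∈ PySem.Chars.lstrip l, PySem.Chars.isspace d = true := by
    intro d hd
    have : List.dropWhile PySem.Chars.isspace (PySem.Chars.lstrip l).reverse = [] := by
      have := hs
      simp only [PySem.Chars.strip, PySem.Chars.rstrip, List.reverse_eq_nil_iff] at this
      exact this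
    have := (List.dropWhile_eq_nil_iff).mp this
    exact this d (List.mem_reverse.mpr hd)
  have hall' : ∀ d ∈ l, PySem.Chars.isspace d = true := by
    intro d hd
    rw [← List.takeWhile_append_dropWhile (p := PySem.Chars.isspace) (l := l)] at hd
    rcases List.mem_append.mp hd with h1 | h2
    · exact List.mem_takeWhile_imp h1
    · exact hall d h2
  rw [hall' c hc] at hf
  simp at hf

lemma pvStrip_all_ws (l : List Char) (h : ∀ c ∈ l, PySem.Chars.isspace c = true) :
    PySem.Chars.strip l = [] := by
  have h1 : PySem.Chars.lstrip l = [] := List.dropWhile_eq_nil_iff.mpr h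
  simp [PySem.Chars.strip, h1, PySem.Chars.rstrip]

lemma pvChar_eq_iff (c d : Char) : c = d ↔ c.toNat = d.toNat := by
  constructor
  · rintro rfl; rfl
  · intro h
    have h1 : c = Char.ofNat d.toNat := by rw [← h]; exact (Char.ofNat_toNat c).symm
    rw [h1, Char.ofNat_toNat]

lemma pvWS_isspace (c : Char) (hd : pvDomChar c = true) :
    pvWS.contains c = PySem.Chars.isspace c := by
  simp only [pvDomChar, Bool.or_eq_true, Bool.and_eq_true, decide_eq_true_eq, beq_iff_eq] at hd
  rw [Bool.eq_iff_iff]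
  simp only [PySem.Chars.isspace, pvWS, List.contains_eq_mem, List.mem_cons,
    List.not_mem_nil, or_false, pvChar_eq_iff, decide_eq_true_eq, Bool.or_eq_true,
    Bool.and_eq_true, decide_eq_true_eq]
  have e1 : (' ' : Char).toNat = 32 := rfl
  have e2 : ('\t' : Char).toNat = 9 := rfl
  have e3 : ('\n' : Char).toNat = 10 := rfl
  have e4 : ('\r' : Char).toNat = 13 := rfl
  have e5 : ('\x0b' : Char).toNat = 11 := rfl
  have e6 : ('\x0c' : Char).toNat = 12 := rfl
  omega

lemma pvFilt_keep (t : List Char) (h : ∃ d ∈ t, pvDomChar d = true ∧ d ∉ pvWS) :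
    pvFilt [t] = [t] := by
  obtain ⟨d, hd, h1, h2⟩ := h
  have hf : PySem.Chars.isspace d = false := by
    rw [← pvWS_isspace d h1]; simpa using h2
  simp [pvFilt, pvStrip_ne_nil t ⟨d, hd, hf⟩]

lemma pvFilt_dropTok (t : List Char) (h : ∀ d ∈ t, pvDomChar d = true ∧ d ∈ pvWS) :
    pvFilt [t] = [] := by
  have hs : PySem.Chars.strip t = [] := by
    apply pvStrip_all_ws
    intro c hc
    rw [← pvWS_isspace c (h c hc).1]
    simpa using (h c hc).2
  simp [pvFilt, hs]

def pvFinA (st : Bool × List Char × List (List Char)) : List (List Char) := st.2.2 ++ [st.2.1]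

lemma pvWordFin_nil (b : Int) (cur : List Char) : pvWordFin b cur [] = [cur] := by
  simp [pvWordFin]

lemma pvWordFin_stop_tag (b : Int) (cur : List Char) (rest : List Char) :
    pvWordFin b cur ('<' :: rest) = cur :: pvGoB b ('<' :: rest) := by
  rw [pvWordFin]
  simp [show ('<' : Char) ∉ pvWS from by decide]

lemma pvWordFin_stop_ws (b : Int) (cur : List Char) (c : Char) (rest : List Char)
    (hc : c ∈ pvWS) : pvWordFin b cur (c :: rest) = (cur ++ [c]) :: pvGoB b rest := by
  rw [pvWordFin]
  simp [hc]

lemma pvWordFin_step (b : Int) (cur : List Char) (c : Char) (rest : List Char)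
    (h1 : c ∉ pvWS) (h2 : c ≠ '<') :
    pvWordFin b cur (c :: rest) = pvWordFin b (cur ++ [c]) rest := by
  rw [pvWordFin, pvWordFin]
  simp [h1, h2]

lemma pvTagFin_nil (b : Int) (cur : List Char) : pvTagFin b cur [] = [cur] := by
  simp [pvTagFin]

lemma pvTagFin_stop (b : Int) (cur : List Char) (rest : List Char) :
    pvTagFin b cur ('>' :: rest) = (cur ++ [if b ≠ 0 then ']' else '>']) :: pvGoB b rest := by
  rw [pvTagFin]
  simp

lemma pvTagFin_step (b : Int) (cur : List Char) (c : Char) (rest : List Char) (hc : c ≠ '>') :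
    pvTagFin b cur (c :: rest) = pvTagFin b (cur ++ [c]) rest := by
  rw [pvTagFin, pvTagFin]
  simp [hc]

-- the loop invariant: A's remaining fold, filtered, is B's chunker from the matching state
lemma pvMain (b : Int) (rest : List Char) (hrest : ∀ d ∈ rest, pvDomChar d = true) :
    (∀ cur out, (∀ d ∈ cur, pvDomChar d = true ∧ d ∉ pvWS ∧ d ≠ '<') →
      pvFilt (pvFinA (List.foldl (pvStepA b) (false, cur, out) rest)) =
        pvFilt out ++ (if cur = [] then pvGoB b rest else pvWordFin b cur rest))
  ∧ (∀ cur out, (∃ d ∈ cur, pvDomChar d = true ∧ d ∉ pvWS) →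
      pvFilt (pvFinA (List.foldl (pvStepA b) (true, cur, out) rest)) =
        pvFilt out ++ pvTagFin b cur rest) := by
  induction rest with
  | nil =>
    constructor
    · intro cur out hcur
      by_cases hnil : cur = []
      · subst hnil
        simp only [List.foldl_nil, pvFinA, pvFilt_append, pvGoB_nil]
        rw [pvFilt_dropTok [] (by simp)]
        simp
      · simp only [List.foldl_nil, pvFinA, pvFilt_append, if_neg hnil, pvWordFin_nil]
        rcases List.exists_mem_of_ne_nil cur hnil with ⟨d, hd⟩
        rw [pvFilt_keep cur ⟨d, hd, (hcur d hd).1, (hcur d hd).2.1⟩]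
    · intro cur out hex
      obtain ⟨d, hd, h1, h2⟩ := hex
      simp only [List.foldl_nil, pvFinA, pvFilt_append, pvTagFin_nil]
      rw [pvFilt_keep cur ⟨d, hd, h1, h2⟩]
  | cons c rest ih =>
    have hrest' : ∀ d ∈ rest, pvDomChar d = true := fun d hd => hrest d (List.mem_cons_of_mem c hd)
    have hcdom : pvDomChar c = true := hrest c List.mem_cons_self
    obtain ⟨ihC, ihT⟩ := ih hrest'
    constructor
    · intro cur out hcur
      simp only [List.foldl_cons]
      by_cases h1 : c = '<'
      · subst h1
        rw [show pvStepA b (false, cur, out) '<' =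
              (true, [if b ≠ 0 then '[' else '<'], out ++ [cur]) from by simp [pvStepA]]
        rw [ihT _ _ ⟨if b ≠ 0 then '[' else '<', by simp, by split <;> decide⟩]
        rw [pvFilt_append]
        by_cases hnil : cur = []
        · subst hnil
          rw [pvFilt_dropTok [] (by simp)]
          simp [pvGoB_tag]
        · rcases List.exists_mem_of_ne_nil cur hnil with ⟨d, hd⟩
          rw [pvFilt_keep cur ⟨d, hd, (hcur d hd).1, (hcur d hd).2.1⟩]
          rw [if_neg hnil, pvWordFin_stop_tag, pvGoB_tag]
          simp
      · by_cases h2 : c ∈ pvWS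
        · rw [show pvStepA b (false, cur, out) c = (false, [], out ++ [cur ++ [c]]) from by
            simp [pvStepA, h1, h2]]
          rw [ihC [] _ (by simp), if_pos rfl, pvFilt_append]
          by_cases hnil : cur = []
          · subst hnil
            simp only [List.nil_append]
            rw [pvFilt_dropTok [c] (by simpa using ⟨hcdom, h2⟩)]
            rw [pvGoB_ws b c rest h1 (by simpa using h2)]
            simp
          · rcases List.exists_mem_of_ne_nil cur hnil with ⟨d, hd⟩
            rw [pvFilt_keep (cur ++ [c]) ⟨d, List.mem_append_left _ hd, (hcur d hd).1, (hcur d hd).2.1⟩]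
            rw [if_neg hnil, pvWordFin_stop_ws b cur c rest h2]
            simp
        · rw [show pvStepA b (false, cur, out) c = (false, cur ++ [c], out) from by
            simp [pvStepA, h1, h2]]
          have hcur' : ∀ d ∈ cur ++ [c], pvDomChar d = true ∧ d ∉ pvWS ∧ d ≠ '<' := by
            intro d hd
            rcases List.mem_append.mp hd with hl | hr
            · exact hcur d hl
            · rw [List.mem_singleton.mp hr]; exact ⟨hcdom, h2, h1⟩
          rw [ihC _ _ hcur', if_neg (by simp)]
          by_cases hnil : cur = []
          · subst hnil
            rw [if_pos rfl, pvGoB_word b c rest h1 (by simpa using h2)]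
            simp
          · rw [if_neg hnil, pvWordFin_step b cur c rest h2 h1]
    · intro cur out hex
      obtain ⟨d, hd, hd1, hd2⟩ := hex
      simp only [List.foldl_cons]
      by_cases h1 : c = '>'
      · subst h1
        rw [show pvStepA b (true, cur, out) '>' =
              (false, [], out ++ [cur ++ [if b ≠ 0 then ']' else '>']]) from by simp [pvStepA]]
        rw [ihC [] _ (by simp), if_pos rfl, pvFilt_append]
        rw [pvFilt_keep (cur ++ [if b ≠ 0 then ']' else '>']) ⟨d, List.mem_append_left _ hd, hd1, hd2⟩]
        rw [pvTagFin_stop]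
        simp
      · rw [show pvStepA b (true, cur, out) c = (true, cur ++ [c], out) from by
          simp [pvStepA, h1]]
        rw [ihT _ _ ⟨d, List.mem_append_left _ hd, hd1, hd2⟩]
        rw [pvTagFin_step b cur c rest h1]

theorem html2list_spec : Claim_equal_html2list := by
  intro x b hdom
  unfold Spec_html2list
  have hrest : ∀ d ∈ x.toList, pvDomChar d = true := by
    have : pvDomStr x = true := by
      simp only [Dom_html2list, Bool.and_eq_true] at hdom
      exact hdom.1
    simpa [pvDomStr, List.all_eq_true] using this
  have h := (pvMain b x.toList hrest).1 [] [] (by simp)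
  rw [if_pos rfl] at h
  show (((List.foldl (pvStepA b) (false, [], []) x.toList).2.2 ++
      [(List.foldl (pvStepA b) (false, [], []) x.toList).2.1]).filter
        (fun t => decide (PySem.Chars.strip t ≠ []))).map String.ofList =
    (pvGoB b x.toList).map String.ofList
  have h' : pvFilt (pvFinA (List.foldl (pvStepA b) (false, [], []) x.toList)) = pvGoB b x.toList := by
    rw [h]; simp [pvFilt]
  simp only [pvFilt, pvFinA] at h'
  rw [h']
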